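-- pv_equiv track=rewrite | github.com/ngraczykowski/iris-root | organization-name-agent/company_name/compare.py | cut_from_start
-- ===== SOURCE A (Python) =====
-- import itertools
-- from typing import Mapping, Set, Sequence, Tuple
--
-- def term_variants(term: str) -> Set[str]:
--     return {
--         term,
--         term + ".",
--         *(
--             " ".join(w).strip()
--             for w in itertools.product(
--                 *[
--                     (" ".join(t), "".join(t), ". ".join(t) + ".", ".".join(t) + ".")
--                     for t in term.split()
--                 ]
--             )
--         ),
--     }
--
-- def cut_from_start(name: str, terms_to_cut):
--     possibilities = []
--     for term in terms_to_cut: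
--         for term_variant in term_variants(term):
--             if name.startswith(term_variant + " "):
--                 possibilities.append((term_variant, term))
--     if not possibilities:
--         return (), name
--     best_one = sorted([(len(x[0]), x) for x in possibilities])[-1][1]
--     other_terms, base = cut_from_start(name[len(best_one[0]):].strip(), terms_to_cut)
--     return (best_one[1], *other_terms), base.strip()
-- ===== SOURCE B (Python) =====
-- def _forms(word):
--     return (" ".join(word), word, ". ".join(word) + ".", ".".join(word) + ".")
--
-- def _best_len(name, term):
--     # longest L such that some variant of term equals name[:L] and name[L] == " "
--     ends = {0}
--     for w in term.split():
--         started, ends = ends, set()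
--         for p in started:
--             if p > 0 and (p >= len(name) or name[p] != " "):
--                 continue
--             start = p + 1 if p > 0 else p
--             for f in _forms(w):
--                 if name.startswith(f, start):
--                     ends.add(start + len(f))
--     cands = [p for p in ends if p < len(name) and name[p] == " "]
--     for v in (term, term + "."):
--         if name.startswith(v + " "):
--             cands.append(len(v))
--     return max(cands, default=None)
--
-- def cut_from_start(name, terms_to_cut):
--     best = None  # (length of matched prefix, term); the matched prefix is name[:L]
--     for term in terms_to_cut:
--         L = _best_len(name, term)
--         if L is not None and (best is None or (L, term) > best):
--             best = (L, term)
--     if best is None: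
--         return (), name
--     L, term = best
--     rest, base = cut_from_start(name[L:].strip(), terms_to_cut)
--     return (term, *rest), base.strip()
-- ===== Notes on version B (the rewrite author's own statement) =====
-- stated objective: alternative
-- what changed: B replaces A's enumeration of all 4^k per-word form combinations per term (itertools.product of per-word variants, each tested with startswith) with a set-of-positions prefix matcher that walks the name word by word trying the four forms of each word, and replaces the build-sort-take-last selection with a running (length, term) maximum; intended to avoid the exponential variant enumeration (measured only ~1.2x on a timing run's random inputs, which rarely contain many-word terms).
import Mathlib
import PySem

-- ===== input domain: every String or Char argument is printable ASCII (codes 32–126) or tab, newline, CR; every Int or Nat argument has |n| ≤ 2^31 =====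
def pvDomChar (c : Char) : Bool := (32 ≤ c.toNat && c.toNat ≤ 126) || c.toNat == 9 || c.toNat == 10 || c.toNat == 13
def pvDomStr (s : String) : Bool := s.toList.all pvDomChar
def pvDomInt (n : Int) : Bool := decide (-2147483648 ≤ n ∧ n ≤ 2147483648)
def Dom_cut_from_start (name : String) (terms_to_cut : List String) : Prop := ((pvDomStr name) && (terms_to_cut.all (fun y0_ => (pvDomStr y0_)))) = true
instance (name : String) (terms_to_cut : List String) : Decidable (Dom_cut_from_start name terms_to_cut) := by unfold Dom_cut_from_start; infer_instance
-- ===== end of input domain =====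

-- B replaces A's enumeration of all 4^k per-word form combinations per term with a
-- set-of-positions prefix matcher that walks the name word by word (objective: alternative
-- algorithm; intended to avoid the exponential enumeration, measured ~1.2x on the random
-- timing inputs); return values are proved identical.

-- ===== PORT A =====
-- Python tuple comparison (len, (variant, term)) used by A's sorted(...): lexicographic.
def pvTripLt (a b : Int × (List Char × String)) : Prop :=
  a.1 < b.1 ∨ (a.1 = b.1 ∧ (a.2.1 < b.2.1 ∨ (a.2.1 = b.2.1 ∧ a.2.2 < b.2.2)))

def pvTripLtDec : ∀ a b, Decidable (pvTripLt a b) := fun a b => by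
  unfold pvTripLt; infer_instance

-- itertools.product over lists of alternatives (tuples as lists)
def pvProduct (ls : List (List (List Char))) : List (List (List Char)) :=
  ls.foldr (fun fs acc => fs.flatMap (fun f => acc.map (fun vs => f :: vs))) [[]]

-- term_variants: strings represented as List Char
def pvTermVariants (term : List Char) : PySem.Set (List Char) :=
  PySem.Set.ofList ([term, term ++ ['.']] ++
    (pvProduct ((PySem.Chars.split₀ term).map (fun t =>
        [PySem.Chars.join [' '] (t.map (fun c => [c])), t,
         PySem.Chars.join ['.', ' '] (t.map (fun c => [c])) ++ ['.'],
         PySem.Chars.join ['.'] (t.map (fun c => [c])) ++ ['.']]))).map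
      (fun w => PySem.Chars.strip (PySem.Chars.join [' '] w)))

-- fuel = |name| + 1 suffices: every recursive call strictly shortens the name (totality guard only)
def cut_from_start_chars : Nat → List Char → List String → List String × List Char
  | 0, name, _ => ([], name)
  | fuel + 1, name, terms =>
    let poss := terms.foldl (fun acc term =>
        (pvTermVariants term.toList).foldl (fun acc tv =>
          if PySem.Chars.startswith name (tv ++ [' ']) then acc ++ [(tv, term)] else acc) acc) []
    if poss.isEmpty then ([], name)
    else
      let keyed := poss.map (fun x => (PySem.Chars.len x.1, x))
      let sortd := @PySem.List.sorted _ _ ⟨pvTripLt⟩ pvTripLtDec keyed (fun x => x) false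
      let bestPair := ((PySem.List.pyGet? sortd (-1)).getD (0, ([], ""))).2
      let r := cut_from_start_chars fuel
        (PySem.Chars.strip (PySem.List.slice name (some (PySem.Chars.len bestPair.1)) none)) terms
      (bestPair.2 :: r.1, PySem.Chars.strip r.2)

def cut_from_start (name : String) (terms_to_cut : List String) : List String × String :=
  let r := cut_from_start_chars (name.toList.length + 1) name.toList terms_to_cut
  (r.1, String.ofList r.2)

-- ===== PORT B =====
-- _forms(word): the four shapes a word may take inside a matched prefix
def pvFormsL (w : List Char) : List (List Char) :=
  [PySem.Chars.join [' '] (w.map (fun c => [c])), w,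
   PySem.Chars.join ['.', ' '] (w.map (fun c => [c])) ++ ['.'],
   PySem.Chars.join ['.'] (w.map (fun c => [c])) ++ ['.']]

-- one word of the position-set matcher
def pvStepWord (name : List Char) (started : PySem.Set Nat) (w : List Char) : PySem.Set Nat :=
  started.foldl (fun ends p =>
    if 0 < p ∧ (name.length ≤ p ∨ ¬ (name[p]? = some ' ')) then ends
    else
      let start := if 0 < p then p + 1 else p
      (pvFormsL w).foldl (fun ends f =>
        if PySem.Chars.startswith (name.drop start) f then PySem.Set.add ends (start + f.length)
        else ends) ends) []

-- _best_len
def pvBestLen (name : List Char) (term : String) : Option Nat :=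
  let ends := (PySem.Chars.split₀ term.toList).foldl (pvStepWord name) (PySem.Set.ofList [0])
  let cands := ends.filter (fun p => decide (p < name.length ∧ name[p]? = some ' '))
  let cands := [term.toList, term.toList ++ ['.']].foldl (fun c v =>
      if PySem.Chars.startswith name (v ++ [' ']) then c ++ [v.length] else c) cands
  PySem.List.max? cands (fun x => x)

-- Python tuple comparison (L, term) > best
def pvPairGtB (a b : Nat × String) : Bool := decide (b.1 < a.1 ∨ (a.1 = b.1 ∧ b.2 < a.2))

def cut_from_start_alt_chars : Nat → List Char → List String → List String × List Char
  | 0, name, _ => ([], name)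
  | fuel + 1, name, terms =>
    let best := terms.foldl (fun best term =>
      match pvBestLen name term with
      | none => best
      | some L =>
        match best with
        | none => some (L, term)
        | some b => if pvPairGtB (L, term) b then some (L, term) else some b) none
    match best with
    | none => ([], name)
    | some (L, term) =>
      let r := cut_from_start_alt_chars fuel (PySem.Chars.strip (name.drop L)) terms
      (term :: r.1, PySem.Chars.strip r.2)

def cut_from_start_alt (name : String) (terms_to_cut : List String) : List String × String :=
  let r := cut_from_start_alt_chars (name.toList.length + 1) name.toList terms_to_cut
  (r.1, String.ofList r.2)

-- ===== PRECONDITION & SPEC =====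
def Spec_cut_from_start (name : String) (terms_to_cut : List String) (out : List String × String) : Prop := out = cut_from_start_alt name terms_to_cut
instance (name : String) (terms_to_cut : List String) (out : List String × String) : Decidable (Spec_cut_from_start name terms_to_cut out) := by unfold Spec_cut_from_start; infer_instance

-- ===== CLAIM (what is proved, stated in full; the proofs are below) =====
def Claim_equal_cut_from_start : Prop := ∀ (name : String) (terms_to_cut : List String), Dom_cut_from_start name terms_to_cut → Spec_cut_from_start name terms_to_cut (cut_from_start name terms_to_cut)

-- ===== LEMMAS AND PROOFS =====

def pvWordOk (w : List Char) : Prop := w ≠ [] ∧ ∀ c ∈ w, PySem.Chars.isspace c = false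

lemma pv_go_ok (s : List Char) : ∀ (cur : List Char) (acc : List (List Char)),
    (∀ c ∈ cur, PySem.Chars.isspace c = false) → (∀ w ∈ acc, pvWordOk w) →
    ∀ w ∈ PySem.Chars.split₀.go s cur acc, pvWordOk w := by
  induction s with
  | nil =>
    intro cur acc hcur hacc w hw
    simp only [PySem.Chars.split₀.go] at hw
    split at hw
    · exact hacc w (by simpa using hw)
    · rename_i hne
      rcases (by simpa using hw : w ∈ acc ∨ w = cur.reverse) with h | h
      · exact hacc w h
      · subst h
        constructor
        · simpa [List.isEmpty_iff] using hne
        · intro c hc; exact hcur c (by simpa using hc)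
  | cons c rest ih =>
    intro cur acc hcur hacc w hw
    simp only [PySem.Chars.split₀.go] at hw
    split at hw
    · split at hw
      · exact ih [] acc (by simp) hacc w hw
      · refine ih [] _ (by simp) ?_ w hw
        intro w' hw'
        rcases List.mem_cons.1 hw' with h | h
        · subst h
          rename_i hsp hne
          exact ⟨by simpa [List.isEmpty_iff] using hne, fun c hc => hcur c (by simpa using hc)⟩
        · exact hacc w' h
    · refine ih (c :: cur) acc ?_ hacc w hw
      intro c' hc'
      rcases List.mem_cons.1 hc' with h | h
      · subst h; rename_i hsp; simpa using hsp
      · exact hcur c' h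

lemma pv_split₀_ok (s : List Char) : ∀ w ∈ PySem.Chars.split₀ s, pvWordOk w := by
  exact pv_go_ok s [] [] (by simp) (by simp)

lemma pv_startswith_space_iff (name tv : List Char) :
    PySem.Chars.startswith name (tv ++ [' ']) = true ↔
      (tv <+: name ∧ name[tv.length]? = some ' ') := by
  rw [PySem.Chars.startswith_iff]
  constructor
  · rintro ⟨t, rfl⟩
    rw [List.append_assoc]
    refine ⟨⟨' ' :: t, by simp⟩, ?_⟩
    rw [List.getElem?_append_right (le_refl _)]
    simp
  · rintro ⟨⟨t, rfl⟩, hc⟩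
    rw [List.getElem?_append_right (le_refl _)] at hc
    simp at hc
    match t, hc with
    | c :: t', hc =>
      simp at hc
      subst hc
      exact ⟨t', by simp⟩

lemma pv_matched_take {name tv : List Char}
    (h : PySem.Chars.startswith name (tv ++ [' ']) = true) :
    tv = name.take tv.length ∧ name[tv.length]? = some ' ' := by
  rcases (pv_startswith_space_iff name tv).1 h with ⟨hp, hc⟩
  exact ⟨List.prefix_iff_eq_take.1 hp, hc⟩

-- join of a nonempty-tail list
lemma pv_join_append_singleton (sep : List Char) (vs : List (List Char)) (f : List Char)
    (h : vs ≠ []) :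
    PySem.Chars.join sep (vs ++ [f]) = PySem.Chars.join sep vs ++ sep ++ f := by
  induction vs with
  | nil => simp at h
  | cons a vs ih =>
    cases vs with
    | nil => simp [PySem.Chars.join_singleton, PySem.Chars.join_cons_cons]
    | cons b vs' =>
      simp only [List.cons_append]
      rw [PySem.Chars.join_cons_cons, PySem.Chars.join_cons_cons, ← List.cons_append,
        ih (by simp)]
      simp [List.append_assoc]

lemma pv_join_head (sep : List Char) (x : List Char) (xs : List (List Char)) (hx : x ≠ []) :
    (PySem.Chars.join sep (x :: xs)).head? = x.head? := by
  cases xs with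
  | nil => simp [PySem.Chars.join_singleton]
  | cons y ys =>
    rw [PySem.Chars.join_cons_cons, List.append_assoc, List.head?_append_of_ne_nil _ hx]

lemma pv_join_last (sep : List Char) : ∀ (xs : List (List Char)) (x : List Char), x ≠ [] →
    (PySem.Chars.join sep (xs ++ [x])).getLast? = x.getLast? := by
  intro xs x hx
  cases xs with
  | nil => simp [PySem.Chars.join_singleton]
  | cons a as =>
    rw [pv_join_append_singleton sep (a :: as) x (by simp)]
    rw [List.getLast?_append_of_ne_nil _ hx]

lemma pv_lstrip_eq_self {cs : List Char} (h : ∀ c, cs.head? = some c → PySem.Chars.isspace c = false) :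
    PySem.Chars.lstrip cs = cs := by
  cases cs with
  | nil => rfl
  | cons c t =>
    simp [PySem.Chars.lstrip, h c rfl]

lemma pv_rstrip_eq_self {cs : List Char} (h : ∀ c, cs.getLast? = some c → PySem.Chars.isspace c = false) :
    PySem.Chars.rstrip cs = cs := by
  unfold PySem.Chars.rstrip
  cases hr : cs.reverse with
  | nil => simpa using congrArg List.reverse hr
  | cons c t =>
    have hc : cs.getLast? = some c := by
      rw [← List.head?_reverse, hr]; rfl
    rw [List.dropWhile_cons]
    simp [h c hc, ← hr]

lemma pv_strip_eq_self {cs : List Char}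
    (h1 : ∀ c, cs.head? = some c → PySem.Chars.isspace c = false)
    (h2 : ∀ c, cs.getLast? = some c → PySem.Chars.isspace c = false) :
    PySem.Chars.strip cs = cs := by
  unfold PySem.Chars.strip
  rw [pv_lstrip_eq_self h1, pv_rstrip_eq_self h2]

lemma pv_join_single_head (sep : List Char) (w : List Char) (h : w ≠ []) :
    (PySem.Chars.join sep (w.map (fun c => [c]))).head? = w.head? := by
  cases w with
  | nil => simp at h
  | cons c t => simpa using pv_join_head sep [c] (t.map (fun c => [c])) (by simp)

lemma pv_join_single_last (sep : List Char) (w : List Char) (h : w ≠ []) :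
    (PySem.Chars.join sep (w.map (fun c => [c]))).getLast? = w.getLast? := by
  conv_lhs => rw [← List.dropLast_append_getLast h]
  rw [List.map_append, List.map_singleton,
    pv_join_last sep _ _ (by simp)]
  simp [List.getLast?_eq_some_getLast h]

lemma pv_forms_ne_nil {w f : List Char} (hw : pvWordOk w) (hf : f ∈ pvFormsL w) : f ≠ [] := by
  have h1 := pv_join_single_head [' '] w hw.1
  have h3 := pv_join_single_head ['.', ' '] w hw.1
  have h4 := pv_join_single_head ['.'] w hw.1
  simp only [pvFormsL, List.mem_cons] at hf
  rcases hf with rfl | rfl | rfl | rfl | h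
  · intro h; rw [h] at h1; cases w with | nil => exact hw.1 rfl | cons a b => simp_all
  · exact hw.1
  · simp
  · simp
  · simp at h

lemma pv_forms_head {w f : List Char} (hw : pvWordOk w) (hf : f ∈ pvFormsL w)
    {c : Char} (hc : f.head? = some c) : PySem.Chars.isspace c = false := by
  have hmem : ∀ d, w.head? = some d → PySem.Chars.isspace d = false := by
    intro d hd; exact hw.2 d (List.mem_of_mem_head? hd)
  simp only [pvFormsL, List.mem_cons] at hf
  rcases hf with rfl | rfl | rfl | rfl | h
  · rw [pv_join_single_head _ _ hw.1] at hc; exact hmem c hc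
  · exact hmem c hc
  · rw [List.head?_append_of_ne_nil _ ?hne] at hc
    case hne =>
      intro h
      have := pv_join_single_head ['.', ' '] w hw.1
      rw [h] at this; cases w with | nil => exact hw.1 rfl | cons a b => simp_all
    rw [pv_join_single_head _ _ hw.1] at hc; exact hmem c hc
  · rw [List.head?_append_of_ne_nil _ ?hne2] at hc
    case hne2 =>
      intro h
      have := pv_join_single_head ['.'] w hw.1
      rw [h] at this; cases w with | nil => exact hw.1 rfl | cons a b => simp_all
    rw [pv_join_single_head _ _ hw.1] at hc; exact hmem c hc
  · simp at h

lemma pv_forms_last {w f : List Char} (hw : pvWordOk w) (hf : f ∈ pvFormsL w)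
    {c : Char} (hc : f.getLast? = some c) : PySem.Chars.isspace c = false := by
  have hmem : ∀ d, w.getLast? = some d → PySem.Chars.isspace d = false := by
    intro d hd; exact hw.2 d (List.mem_of_mem_getLast? hd)
  simp only [pvFormsL, List.mem_cons] at hf
  rcases hf with rfl | rfl | rfl | rfl | h
  · rw [pv_join_single_last _ _ hw.1] at hc; exact hmem c hc
  · exact hmem c hc
  · rw [List.getLast?_append_of_ne_nil _ (by simp)] at hc
    simp at hc; subst hc; decide
  · rw [List.getLast?_append_of_ne_nil _ (by simp)] at hc
    simp at hc; subst hc; decide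
  · simp at h

lemma pv_forall₂_append_singleton {α β : Type} {R : α → β → Prop} (xs : List α)
    (ws : List β) (w : β) :
    List.Forall₂ R xs (ws ++ [w]) ↔
      ∃ vs f, xs = vs ++ [f] ∧ List.Forall₂ R vs ws ∧ R f w := by
  rw [← List.forall₂_reverse_iff]
  simp only [List.reverse_append, List.reverse_cons, List.reverse_nil, List.nil_append,
    List.singleton_append]
  rw [List.forall₂_cons_right_iff]
  constructor
  · rintro ⟨a, l, hR, hF, hrev⟩
    refine ⟨l.reverse, a, ?_, ?_, hR⟩
    · have := congrArg List.reverse hrev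
      simpa using this
    · rw [← List.forall₂_reverse_iff]; simpa using hF
  · rintro ⟨vs, f, rfl, hF, hR⟩
    exact ⟨f, vs.reverse, hR, by rw [← List.forall₂_reverse_iff] at hF ⊢; simpa using hF,
      by simp⟩

lemma pv_product_mem (ls : List (List (List Char))) (vs : List (List Char)) :
    vs ∈ pvProduct ls ↔ List.Forall₂ (fun v fs => v ∈ fs) vs ls := by
  induction ls generalizing vs with
  | nil => simp [pvProduct]
  | cons fs ls ih =>
    show vs ∈ fs.flatMap (fun f => (pvProduct ls).map (fun vs => f :: vs)) ↔ _
    rw [List.forall₂_cons_right_iff]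
    simp only [List.mem_flatMap, List.mem_map]
    constructor
    · rintro ⟨f, hf, vs', hvs', rfl⟩
      exact ⟨f, vs', hf, (ih vs').1 hvs', rfl⟩
    · rintro ⟨f, vs', hf, hF, rfl⟩
      exact ⟨f, hf, vs', (ih vs').2 hF, rfl⟩

lemma pv_join_ne_nil {vs : List (List Char)} {ws : List (List Char)}
    (hF : List.Forall₂ (fun v w => v ∈ pvFormsL w) vs ws) (hws : ∀ w ∈ ws, pvWordOk w)
    (h : vs ≠ []) : PySem.Chars.join [' '] vs ≠ [] := by
  match vs, hF with
  | v :: vs', List.Forall₂.cons (b := w) (l₂ := ws') hR hF' =>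
    have hv : v ≠ [] := pv_forms_ne_nil (hws w (by simp)) hR
    have := pv_join_head [' '] v vs' hv
    intro hnil
    rw [hnil] at this
    cases v with
    | nil => exact hv rfl
    | cons a b => simp at this

lemma pv_strip_join {vs ws : List (List Char)}
    (hF : List.Forall₂ (fun v w => v ∈ pvFormsL w) vs ws) (hws : ∀ w ∈ ws, pvWordOk w) :
    PySem.Chars.strip (PySem.Chars.join [' '] vs) = PySem.Chars.join [' '] vs := by
  match vs, hF with
  | [], List.Forall₂.nil => simp [PySem.Chars.join_nil]; rfl
  | v :: vs', List.Forall₂.cons (b := w) (l₂ := ws') hR hF' =>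
    have hv : v ≠ [] := pv_forms_ne_nil (hws w (by simp)) hR
    have hFall : List.Forall₂ (fun v w => v ∈ pvFormsL w) (v :: vs') (w :: ws') :=
      List.Forall₂.cons hR hF'
    refine pv_strip_eq_self ?_ ?_
    · intro c hc
      rw [pv_join_head [' '] v vs' hv] at hc
      exact pv_forms_head (hws w (by simp)) hR hc
    · intro c hc
      have hFr := List.forall₂_reverse_iff.2 hFall
      cases hrev : (v :: vs').reverse with
      | nil => exact absurd (congrArg List.length hrev) (by simp)
      | cons f rvs =>
        rw [hrev] at hFr
        rcases List.forall₂_cons_left_iff.1 hFr with ⟨w', rws, hRfw, hF2, hwseq⟩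
        have hwmem : w' ∈ w :: ws' := by
          have : w' ∈ (w :: ws').reverse := by rw [hwseq]; simp
          exact List.mem_reverse.1 this
        have hfne : f ≠ [] := pv_forms_ne_nil (hws w' hwmem) hRfw
        have hvs : v :: vs' = rvs.reverse ++ [f] := by
          have := congrArg List.reverse hrev
          simpa using this
        rw [hvs, pv_join_last [' '] rvs.reverse f hfne] at hc
        exact pv_forms_last (hws w' hwmem) hRfw hc

lemma pv_mem_addfold (fs : List (List Char)) (cond : List Char → Bool) (val : List Char → Nat)
    (q : Nat) : ∀ s0 : PySem.Set Nat,
    q ∈ fs.foldl (fun s f => if cond f then PySem.Set.add s (val f) else s) s0 ↔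
      q ∈ s0 ∨ ∃ f ∈ fs, cond f = true ∧ q = val f := by
  induction fs with
  | nil => simp
  | cons f fs ih =>
    intro s0
    simp only [List.foldl_cons]
    by_cases hc : cond f
    · rw [hc, if_pos rfl, ih]
      simp only [PySem.Set.mem_add, List.mem_cons]
      constructor
      · rintro (⟨h | h⟩ | ⟨g, hg, hcg, rfl⟩)
        · exact Or.inl h
        · exact Or.inr ⟨f, Or.inl rfl, hc, h⟩
        · exact Or.inr ⟨g, Or.inr hg, hcg, rfl⟩
      · rintro (h | ⟨g, (rfl | hg), hcg, rfl⟩)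
        · exact Or.inl (Or.inl h)
        · exact Or.inl (Or.inr rfl)
        · exact Or.inr ⟨g, hg, hcg, rfl⟩
    · rw [if_neg hc, ih]
      simp only [List.mem_cons]
      constructor
      · rintro (h | ⟨g, hg, hcg, rfl⟩)
        · exact Or.inl h
        · exact Or.inr ⟨g, Or.inr hg, hcg, rfl⟩
      · rintro (h | ⟨g, (rfl | hg), hcg, rfl⟩)
        · exact Or.inl h
        · exact absurd hcg (by simpa using hc)
        · exact Or.inr ⟨g, hg, hcg, rfl⟩

lemma pv_mem_step (name : List Char) (E : PySem.Set Nat) (w : List Char) (q : Nat) :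
    q ∈ pvStepWord name E w ↔
      ∃ p ∈ E, (0 < p → (p < name.length ∧ name[p]? = some ' ')) ∧
        ∃ f ∈ pvFormsL w,
          PySem.Chars.startswith (name.drop (if 0 < p then p + 1 else p)) f = true ∧
          q = (if 0 < p then p + 1 else p) + f.length := by
  unfold pvStepWord
  have main : ∀ (ps : List Nat) (s0 : PySem.Set Nat),
      q ∈ ps.foldl (fun ends p =>
        if 0 < p ∧ (name.length ≤ p ∨ ¬ (name[p]? = some ' ')) then ends
        else
          let start := if 0 < p then p + 1 else p
          (pvFormsL w).foldl (fun ends f =>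
            if PySem.Chars.startswith (name.drop start) f then PySem.Set.add ends (start + f.length)
            else ends) ends) s0 ↔
        q ∈ s0 ∨ ∃ p ∈ ps, (0 < p → (p < name.length ∧ name[p]? = some ' ')) ∧
          ∃ f ∈ pvFormsL w,
            PySem.Chars.startswith (name.drop (if 0 < p then p + 1 else p)) f = true ∧
            q = (if 0 < p then p + 1 else p) + f.length := by
    intro ps
    induction ps with
    | nil => simp
    | cons p ps ih =>
      intro s0
      simp only [List.foldl_cons]
      by_cases hg : 0 < p ∧ (name.length ≤ p ∨ ¬ (name[p]? = some ' '))
      · rw [if_pos hg, ih]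
        constructor
        · rintro (h | h)
          · exact Or.inl h
          · rcases h with ⟨p', hp', rest⟩; exact Or.inr ⟨p', List.mem_cons_of_mem _ hp', rest⟩
        · rintro (h | ⟨p', hp', hguard, rest⟩)
          · exact Or.inl h
          · rcases List.mem_cons.1 hp' with rfl | hmem
            · exact absurd (hguard hg.1) (by
                rcases hg.2 with h2 | h2
                · intro hlt; omega
                · intro hlt; exact h2 hlt.2)
            · exact Or.inr ⟨p', hmem, hguard, rest⟩
      · rw [if_neg hg, ih, pv_mem_addfold]
        constructor
        · rintro ((h | ⟨f, hf, hc, rfl⟩) | h)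
          · exact Or.inl h
          · refine Or.inr ⟨p, List.mem_cons_self .., ?_, f, hf, hc, rfl⟩
            intro hp
            constructor
            · by_contra hlen; exact hg ⟨hp, Or.inl (by omega)⟩
            · by_contra hsp; exact hg ⟨hp, Or.inr hsp⟩
          · rcases h with ⟨p', hp', rest⟩; exact Or.inr ⟨p', List.mem_cons_of_mem _ hp', rest⟩
        · rintro (h | ⟨p', hp', hguard, f, hf, hc, rfl⟩)
          · exact Or.inl (Or.inl h)
          · rcases List.mem_cons.1 hp' with rfl | hmem
            · exact Or.inl (Or.inr ⟨f, hf, hc, rfl⟩)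
            · exact Or.inr ⟨p', hmem, hguard, f, hf, hc, rfl⟩
  exact (main E []).trans (by simp)

lemma pv_prefix_glue {name l f : List Char} (hl : l <+: name)
    (hc : name[l.length]? = some ' ') (hf : f <+: name.drop (l.length + 1)) :
    l ++ [' '] ++ f <+: name := by
  rcases hl with ⟨t, rfl⟩
  rcases hf with ⟨u, hu⟩
  rw [List.getElem?_append_right (le_refl _)] at hc
  simp at hc
  have hdrop : (l ++ t).drop (l.length + 1) = t.drop 1 := by
    have := List.drop_append (l₁ := l) (l₂ := t) (i := 1)
    simpa using this
  rw [hdrop] at hu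
  match t, hc with
  | c :: t', hc =>
    simp at hc
    subst hc
    refine ⟨u, ?_⟩
    simp at hu
    subst hu
    simp

lemma pv_ends_iff (name : List Char) : ∀ (ws : List (List Char)),
    (∀ w ∈ ws, pvWordOk w) → ∀ (q : Nat),
    (q ∈ ws.foldl (pvStepWord name) (PySem.Set.ofList [0]) ↔
      ∃ vs, List.Forall₂ (fun v w => v ∈ pvFormsL w) vs ws ∧
        PySem.Chars.join [' '] vs <+: name ∧ q = (PySem.Chars.join [' '] vs).length) := by
  intro ws
  induction ws using List.reverseRecOn with
  | nil =>
    intro _ q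
    constructor
    · intro h
      refine ⟨[], List.Forall₂.nil, by simp [PySem.Chars.join_nil], ?_⟩
      have : q ∈ ([0] : List Nat) := by simpa using h
      simp [PySem.Chars.join_nil]
      simpa using this
    · rintro ⟨vs, hF, _, rfl⟩
      cases hF
      simp [PySem.Chars.join_nil]
  | append_singleton ws w ih =>
    intro hws q
    have hws' : ∀ w' ∈ ws, pvWordOk w' := fun w' h => hws w' (by simp [h])
    have hwok : pvWordOk w := hws w (by simp)
    have ihq := ih hws'
    rw [List.foldl_append]
    simp only [List.foldl_cons, List.foldl_nil]
    rw [pv_mem_step]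
    constructor
    · rintro ⟨p, hp, hguard, f, hf, hsw, rfl⟩
      rcases (ihq p).1 hp with ⟨vs, hF, hpre, hlen⟩
      by_cases hp0 : 0 < p
      · have hvs_ne : vs ≠ [] := by
          intro h; subst h; simp [PySem.Chars.join_nil] at hlen; omega
        rcases hguard hp0 with ⟨hplen, hpsp⟩
        refine ⟨vs ++ [f], (pv_forall₂_append_singleton _ _ _).2 ⟨vs, f, rfl, hF, hf⟩, ?_, ?_⟩
        · rw [pv_join_append_singleton _ _ _ hvs_ne]
          rw [if_pos hp0] at hsw
          exact pv_prefix_glue hpre (hlen ▸ hpsp) (by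
            rw [PySem.Chars.startswith_iff] at hsw; exact hlen ▸ hsw)
        · rw [pv_join_append_singleton _ _ _ hvs_ne]
          rw [if_pos hp0]
          simp [hlen]
          omega
      · have hp' : p = 0 := by omega
        subst hp'
        have hvs : vs = [] := by
          by_contra hne
          exact pv_join_ne_nil hF hws' hne (by
            cases hj : PySem.Chars.join [' '] vs with
            | nil => rfl
            | cons a b => rw [hj] at hlen; simp at hlen)
        subst hvs
        cases hF
        refine ⟨[f], ?_, ?_, ?_⟩
        · exact List.Forall₂.cons hf List.Forall₂.nil
        · rw [PySem.Chars.join_singleton]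
          rw [if_neg hp0] at hsw
          rw [PySem.Chars.startswith_iff] at hsw
          simpa using hsw
        · rw [PySem.Chars.join_singleton, if_neg hp0]
          simp
    · rintro ⟨vs', hF, hpre, rfl⟩
      rcases (pv_forall₂_append_singleton _ _ _).1 hF with ⟨vs, f, rfl, hFvs, hfw⟩
      by_cases hvs : vs = []
      · subst hvs
        cases hFvs
        refine ⟨0, by simp [PySem.Set.ofList], ?_⟩
        refine ⟨by omega, f, hfw, ?_, ?_⟩
        · rw [if_neg (by omega)]
          rw [PySem.Chars.startswith_iff]
          simpa [PySem.Chars.join_singleton] using hpre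
        · rw [if_neg (by omega)]
          simp [PySem.Chars.join_singleton]
      · have hjoin_ne := pv_join_ne_nil hFvs hws' hvs
        set p := (PySem.Chars.join [' '] vs).length with hp
        have hp0 : 0 < p := by
          cases hj : PySem.Chars.join [' '] vs with
          | nil => exact absurd hj hjoin_ne
          | cons a b => rw [hp, hj]; simp
        rw [pv_join_append_singleton _ _ _ hvs] at hpre
        have hpre_vs : PySem.Chars.join [' '] vs <+: name :=
          List.IsPrefix.trans (by exact ⟨[' '] ++ f, by simp⟩) hpre
        rcases hpre with ⟨t, ht⟩
        have hname : name = PySem.Chars.join [' '] vs ++ ' ' :: (f ++ t) := by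
          rw [← ht]; simp
        refine ⟨p, (ihq p).2 ⟨vs, hFvs, hpre_vs, rfl⟩, ?_, f, hfw, ?_, ?_⟩
        · intro _
          constructor
          · rw [hname]; simp; omega
          · rw [hname, List.getElem?_append_right (by omega)]
            simp [hp]
        · rw [if_pos hp0, PySem.Chars.startswith_iff, hname]
          have : (PySem.Chars.join [' '] vs ++ ' ' :: (f ++ t)).drop (p + 1) = f ++ t := by
            have h1 : ' ' :: (f ++ t) = [' '] ++ (f ++ t) := rfl
            rw [h1, ← List.append_assoc]
            have := List.drop_append (l₁ := PySem.Chars.join [' '] vs ++ [' ']) (l₂ := f ++ t) (i := 0)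
            simpa [hp] using this
          rw [this]
          exact ⟨t, rfl⟩
        · rw [if_pos hp0, pv_join_append_singleton _ _ _ hvs]
          simp [hp]
          omega

-- candidate pairs and the Python lexicographic order on them
def pvMatchedT (name : List Char) (term : String) (L : Nat) : Prop :=
  ∃ tv, tv ∈ pvTermVariants term.toList ∧
    PySem.Chars.startswith name (tv ++ [' ']) = true ∧ L = tv.length

def pvCand (name : List Char) (terms : List String) (p : Nat × String) : Prop :=
  p.2 ∈ terms ∧ pvMatchedT name p.2 p.1

def pvPairLe (a b : Nat × String) : Prop := a.1 < b.1 ∨ (a.1 = b.1 ∧ (a.2 < b.2 ∨ a.2 = b.2))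

def pvIsBest (name : List Char) (terms : List String) (p : Nat × String) : Prop :=
  pvCand name terms p ∧ ∀ q, pvCand name terms q → pvPairLe q p


lemma pv_variants_mem (term : List Char) (tv : List Char) :
    tv ∈ pvTermVariants term ↔
      tv = term ∨ tv = term ++ ['.'] ∨
        ∃ vs, List.Forall₂ (fun v w => v ∈ pvFormsL w) vs (PySem.Chars.split₀ term) ∧
          tv = PySem.Chars.strip (PySem.Chars.join [' '] vs) := by
  unfold pvTermVariants
  rw [PySem.Set.mem_ofList]
  simp only [List.mem_append, List.mem_cons, List.mem_map, List.not_mem_nil, or_false]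
  constructor
  · rintro ((rfl | rfl) | ⟨vs, hvs, rfl⟩)
    · exact Or.inl rfl
    · exact Or.inr (Or.inl rfl)
    · refine Or.inr (Or.inr ⟨vs, ?_, rfl⟩)
      have := (pv_product_mem _ vs).1 hvs
      simpa [pvFormsL, List.forall₂_map_right_iff] using this
  · rintro (rfl | rfl | ⟨vs, hF, rfl⟩)
    · exact Or.inl (Or.inl rfl)
    · exact Or.inl (Or.inr rfl)
    · refine Or.inr ⟨vs, ?_, rfl⟩
      rw [pv_product_mem]
      simpa [pvFormsL, List.forall₂_map_right_iff] using hF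

lemma pv_matched_iff (name : List Char) (term : String) (L : Nat) :
    pvMatchedT name term L ↔
      ((PySem.Chars.startswith name (term.toList ++ [' ']) = true ∧ L = term.toList.length) ∨
       (PySem.Chars.startswith name (term.toList ++ ['.'] ++ [' ']) = true ∧ L = term.toList.length + 1) ∨
       (∃ vs, List.Forall₂ (fun v w => v ∈ pvFormsL w) vs (PySem.Chars.split₀ term.toList) ∧
          PySem.Chars.join [' '] vs <+: name ∧ name[(PySem.Chars.join [' '] vs).length]? = some ' ' ∧
          L = (PySem.Chars.join [' '] vs).length)) := by
  unfold pvMatchedT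
  constructor
  · rintro ⟨tv, hmem, hsw, rfl⟩
    rcases (pv_variants_mem _ tv).1 hmem with rfl | rfl | ⟨vs, hF, rfl⟩
    · exact Or.inl ⟨hsw, rfl⟩
    · exact Or.inr (Or.inl ⟨hsw, by simp⟩)
    · rw [pv_strip_join hF (pv_split₀_ok _)] at hsw ⊢
      rcases (pv_startswith_space_iff _ _).1 hsw with ⟨hpre, hc⟩
      exact Or.inr (Or.inr ⟨vs, hF, hpre, hc, rfl⟩)
  · rintro (⟨hsw, rfl⟩ | ⟨hsw, rfl⟩ | ⟨vs, hF, hpre, hc, rfl⟩)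
    · exact ⟨term.toList, (pv_variants_mem _ _).2 (Or.inl rfl), hsw, rfl⟩
    · exact ⟨term.toList ++ ['.'], (pv_variants_mem _ _).2 (Or.inr (Or.inl rfl)), hsw, by simp⟩
    · refine ⟨PySem.Chars.join [' '] vs, ?_, ?_, rfl⟩
      · refine (pv_variants_mem _ _).2 (Or.inr (Or.inr ⟨vs, hF, ?_⟩))
        rw [pv_strip_join hF (pv_split₀_ok _)]
      · exact (pv_startswith_space_iff _ _).2 ⟨hpre, hc⟩

def pvCandsList (name : List Char) (term : String) : List Nat :=
  [term.toList, term.toList ++ ['.']].foldl (fun c v =>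
      if PySem.Chars.startswith name (v ++ [' ']) then c ++ [v.length] else c)
    ((((PySem.Chars.split₀ term.toList).foldl (pvStepWord name) (PySem.Set.ofList [0]))).filter
      (fun p => decide (p < name.length ∧ name[p]? = some ' ')))

lemma pv_bestlen_eq (name : List Char) (term : String) :
    pvBestLen name term = PySem.List.max? (pvCandsList name term) (fun x => x) := rfl

lemma pv_candsList_mem (name : List Char) (term : String) (L : Nat) :
    L ∈ pvCandsList name term ↔ pvMatchedT name term L := by
  rw [pv_matched_iff]
  unfold pvCandsList
  have hfilter : ∀ M : Nat,
      (M ∈ (((PySem.Chars.split₀ term.toList).foldl (pvStepWord name) (PySem.Set.ofList [0]))).filter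
        (fun p => decide (p < name.length ∧ name[p]? = some ' '))) ↔
      (∃ vs, List.Forall₂ (fun v w => v ∈ pvFormsL w) vs (PySem.Chars.split₀ term.toList) ∧
          PySem.Chars.join [' '] vs <+: name ∧ name[(PySem.Chars.join [' '] vs).length]? = some ' ' ∧
          M = (PySem.Chars.join [' '] vs).length) := by
    intro M
    rw [List.mem_filter, pv_ends_iff name _ (pv_split₀_ok _)]
    constructor
    · rintro ⟨⟨vs, hF, hpre, rfl⟩, hc⟩
      have hc' := of_decide_eq_true hc
      exact ⟨vs, hF, hpre, hc'.2, rfl⟩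
    · rintro ⟨vs, hF, hpre, hc, rfl⟩
      refine ⟨⟨vs, hF, hpre, rfl⟩, decide_eq_true ⟨?_, hc⟩⟩
      exact (List.getElem?_eq_some_iff.1 hc).1
  simp only [List.foldl_cons, List.foldl_nil]
  constructor
  · intro hmem
    split_ifs at hmem with h1 h2 h3 <;>
      simp only [List.mem_append, List.mem_singleton, hfilter] at hmem
    · rcases hmem with (h | rfl) | rfl
      · exact Or.inr (Or.inr h)
      · exact Or.inl ⟨h2, rfl⟩
      · exact Or.inr (Or.inl ⟨h1, by simp⟩)
    · rcases hmem with h | rfl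
      · exact Or.inr (Or.inr h)
      · exact Or.inr (Or.inl ⟨h1, by simp⟩)
    · rcases hmem with h | rfl
      · exact Or.inr (Or.inr h)
      · exact Or.inl ⟨h3, rfl⟩
    · exact Or.inr (Or.inr hmem)
  · intro hd
    split_ifs with h1 h2 h3 <;>
      simp only [List.mem_append, List.mem_singleton, hfilter]
    · rcases hd with ⟨hs, rfl⟩ | ⟨hs, hL⟩ | h
      · exact Or.inl (Or.inr rfl)
      · exact Or.inr (by simp at hL ⊢; omega)
      · exact Or.inl (Or.inl h)
    · rcases hd with ⟨hs, rfl⟩ | ⟨hs, hL⟩ | h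
      · exact absurd hs h2
      · exact Or.inr (by simp at hL ⊢; omega)
      · exact Or.inl h
    · rcases hd with ⟨hs, rfl⟩ | ⟨hs, hL⟩ | h
      · exact Or.inr rfl
      · exact absurd hs h1
      · exact Or.inl h
    · rcases hd with ⟨hs, rfl⟩ | ⟨hs, hL⟩ | h
      · exact absurd hs h3
      · exact absurd hs h1
      · exact h

lemma pvBestLen_none_iff (name : List Char) (term : String) :
    pvBestLen name term = none ↔ ∀ L, ¬ pvMatchedT name term L := by
  rw [pv_bestlen_eq, PySem.List.max?_eq_none_iff]
  rw [List.eq_nil_iff_forall_not_mem]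
  constructor
  · intro h L hm; exact h L ((pv_candsList_mem name term L).2 hm)
  · intro h L hm; exact h L ((pv_candsList_mem name term L).1 hm)

lemma pvBestLen_some (name : List Char) (term : String) {L : Nat}
    (h : pvBestLen name term = some L) :
    pvMatchedT name term L ∧ ∀ L', pvMatchedT name term L' → L' ≤ L := by
  rw [pv_bestlen_eq] at h
  refine ⟨(pv_candsList_mem name term L).1 (PySem.List.max?_mem h), ?_⟩
  intro L' hm
  exact PySem.List.max?_isMax h L' ((pv_candsList_mem name term L').2 hm)

def pvStep1 (name : List Char) (best : Option (Nat × String)) (term : String) :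
    Option (Nat × String) :=
  match pvBestLen name term with
  | none => best
  | some L =>
    match best with
    | none => some (L, term)
    | some b => if pvPairGtB (L, term) b then some (L, term) else some b

def pvBFold (name : List Char) (terms : List String) : Option (Nat × String) :=
  terms.foldl (pvStep1 name) none

lemma pvStep1_eq_none {name t} (h : pvBestLen name t = none) (b : Option (Nat × String)) :
    pvStep1 name b t = b := by unfold pvStep1; rw [h]

lemma pvStep1_eq_some_none {name t L} (h : pvBestLen name t = some L) :
    pvStep1 name none t = some (L, t) := by unfold pvStep1; rw [h]

lemma pvStep1_eq_some_some {name t L b} (h : pvBestLen name t = some L) :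
    pvStep1 name (some b) t = if pvPairGtB (L, t) b then some (L, t) else some b := by
  unfold pvStep1; rw [h]

lemma pvPairLe_trans {a b c : Nat × String} (h1 : pvPairLe a b) (h2 : pvPairLe b c) :
    pvPairLe a c := by
  rcases h1 with h1 | ⟨e1, h1⟩
  · rcases h2 with h2 | ⟨e2, h2⟩
    · exact Or.inl (lt_trans h1 h2)
    · exact Or.inl (e2 ▸ h1)
  · rcases h2 with h2 | ⟨e2, h2⟩
    · exact Or.inl (e1 ▸ h2)
    · refine Or.inr ⟨e1.trans e2, ?_⟩
      rcases h1 with h1 | h1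
      · rcases h2 with h2 | h2
        · exact Or.inl (lt_trans h1 h2)
        · exact Or.inl (h2 ▸ h1)
      · rw [h1]
        exact h2

lemma pvPairLe_antisymm {a b : Nat × String} (h1 : pvPairLe a b) (h2 : pvPairLe b a) :
    a = b := by
  rcases h1 with h1 | ⟨e1, h1⟩
  · rcases h2 with h2 | ⟨e2, h2⟩
    · omega
    · omega
  · rcases h2 with h2 | ⟨e2, h2⟩
    · omega
    · rcases h1 with h1 | h1
      · rcases h2 with h2 | h2
        · exact absurd (lt_trans h1 h2) (lt_irrefl _)
        · exact absurd (h2 ▸ h1) (lt_irrefl _)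
      · exact Prod.ext e1 h1
    
lemma pvIsBest_unique {name terms p p'} (h : pvIsBest name terms p) (h' : pvIsBest name terms p') :
    p = p' := pvPairLe_antisymm (h'.2 p h.1) (h.2 p' h'.1)

lemma pvPairGt_false_iff (a b : Nat × String) : pvPairGtB a b = false ↔ pvPairLe a b := by
  unfold pvPairGtB pvPairLe
  rw [decide_eq_false_iff_not]
  constructor
  · intro h
    push_neg at h
    rcases lt_trichotomy a.1 b.1 with hlt | heq | hgt
    · exact Or.inl hlt
    · refine Or.inr ⟨heq, ?_⟩
      rcases lt_trichotomy a.2 b.2 with h2 | h2 | h2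
      · exact Or.inl h2
      · exact Or.inr h2
      · exact absurd h2 (not_lt.2 (h.2 heq))
    · omega
  · intro h
    rintro (hgt | ⟨heq, hgt⟩)
    · rcases h with h | ⟨e, _⟩
      · omega
      · omega
    · rcases h with h | ⟨e, h⟩
      · omega
      · rcases h with h | h
        · exact absurd (lt_trans h hgt) (lt_irrefl _)
        · exact absurd (h ▸ hgt) (lt_irrefl _)

lemma pvPairGt_true_le {a b : Nat × String} (h : pvPairGtB a b = true) : pvPairLe b a := by
  unfold pvPairGtB at h
  rcases of_decide_eq_true h with h1 | ⟨h1, h2⟩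
  · exact Or.inl h1
  · exact Or.inr ⟨h1.symm, Or.inl h2⟩

lemma pvCand_append (name : List Char) (ts : List String) (t : String) (p : Nat × String) :
    pvCand name (ts ++ [t]) p ↔ pvCand name ts p ∨ (p.2 = t ∧ pvMatchedT name t p.1) := by
  unfold pvCand
  simp only [List.mem_append, List.mem_singleton]
  constructor
  · rintro ⟨h1 | h1, h2⟩
    · exact Or.inl ⟨h1, h2⟩
    · exact Or.inr ⟨h1, h1 ▸ h2⟩
  · rintro (⟨h1, h2⟩ | ⟨h1, h2⟩)
    · exact ⟨Or.inl h1, h2⟩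
    · exact ⟨Or.inr h1, h1 ▸ h2⟩

lemma pvBFold_none_iff (name : List Char) (terms : List String) :
    pvBFold name terms = none ↔ ∀ p, ¬ pvCand name terms p := by
  induction terms using List.reverseRecOn with
  | nil => simp [pvBFold, pvCand]
  | append_singleton ts t ih =>
    unfold pvBFold at *
    rw [List.foldl_append, List.foldl_cons, List.foldl_nil]
    constructor
    · intro h p hc
      rcases hbl : pvBestLen name t with _ | L
      · rw [pvStep1_eq_none hbl] at h
        rcases (pvCand_append _ _ _ _).1 hc with h1 | ⟨h1, h2⟩
        · exact (ih.1 h) p h1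
        · exact ((pvBestLen_none_iff name t).1 hbl) p.1 h2
      · rcases hprev : List.foldl (pvStep1 name) none ts with _ | b <;> rw [hprev] at h
        · rw [pvStep1_eq_some_none hbl] at h; simp at h
        · rw [pvStep1_eq_some_some hbl] at h
          split at h <;> simp at h
    · intro h
      have hnone : List.foldl (pvStep1 name) none ts = none :=
        ih.2 (fun p hp => h p ((pvCand_append _ _ _ _).2 (Or.inl hp)))
      rw [hnone]
      rcases hbl : pvBestLen name t with _ | L
      · exact pvStep1_eq_none hbl none
      · exfalso
        have hm := (pvBestLen_some name t hbl).1
        exact h (L, t) ((pvCand_append _ _ _ _).2 (Or.inr ⟨rfl, hm⟩))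

lemma pvBFold_some (name : List Char) (terms : List String) :
    ∀ {p : Nat × String}, pvBFold name terms = some p → pvIsBest name terms p := by
  induction terms using List.reverseRecOn with
  | nil => intro p h; simp [pvBFold] at h
  | append_singleton ts t ih =>
    intro p h
    unfold pvBFold at h
    rw [List.foldl_append, List.foldl_cons, List.foldl_nil] at h
    rcases hbl : pvBestLen name t with _ | L
    · rw [pvStep1_eq_none hbl] at h
      have hb := ih h
      refine ⟨(pvCand_append _ _ _ _).2 (Or.inl hb.1), ?_⟩
      intro q hq
      rcases (pvCand_append _ _ _ _).1 hq with h1 | ⟨h1, h2⟩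
      · exact hb.2 q h1
      · exact absurd h2 (((pvBestLen_none_iff name t).1 hbl) q.1)
    · have hLmax := pvBestLen_some name t hbl
      rcases hprev : List.foldl (pvStep1 name) none ts with _ | b <;> rw [hprev] at h
      · rw [pvStep1_eq_some_none hbl] at h
        cases h
        refine ⟨(pvCand_append _ _ _ _).2 (Or.inr ⟨rfl, hLmax.1⟩), ?_⟩
        intro q hq
        rcases (pvCand_append _ _ _ _).1 hq with h1 | ⟨h1, h2⟩
        · exact absurd h1 ((pvBFold_none_iff name ts).1 hprev q)
        · have := hLmax.2 q.1 h2
          rcases Nat.lt_or_ge q.1 L with hlt | hge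
          · exact Or.inl hlt
          · exact Or.inr ⟨by omega, Or.inr h1⟩
      · have hb := ih hprev
        rw [pvStep1_eq_some_some hbl] at h
        by_cases hgt : pvPairGtB (L, t) b = true
        · rw [if_pos hgt] at h
          cases h
          refine ⟨(pvCand_append _ _ _ _).2 (Or.inr ⟨rfl, hLmax.1⟩), ?_⟩
          intro q hq
          rcases (pvCand_append _ _ _ _).1 hq with h1 | ⟨h1, h2⟩
          · exact pvPairLe_trans (hb.2 q h1) (pvPairGt_true_le hgt)
          · have := hLmax.2 q.1 h2
            rcases Nat.lt_or_ge q.1 L with hlt | hge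
            · exact Or.inl hlt
            · exact Or.inr ⟨by omega, Or.inr h1⟩
        · rw [if_neg hgt] at h
          cases h
          have hle : pvPairLe (L, t) p := (pvPairGt_false_iff _ _).1 (by simpa using hgt)
          refine ⟨(pvCand_append _ _ _ _).2 (Or.inl hb.1), ?_⟩
          intro q hq
          rcases (pvCand_append _ _ _ _).1 hq with h1 | ⟨h1, h2⟩
          · exact hb.2 q h1
          · have hq1 : q.1 ≤ L := hLmax.2 q.1 h2
            refine pvPairLe_trans ?_ hle
            rcases Nat.lt_or_ge q.1 L with hlt | hge
            · exact Or.inl hlt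
            · exact Or.inr ⟨by omega, Or.inr h1⟩

lemma pvTripLt_irrefl (a : Int × (List Char × String)) : ¬ pvTripLt a a := by
  rintro (h | ⟨_, h | ⟨_, h⟩⟩) <;> exact lt_irrefl _ h

lemma pvTripLt_trans {a b c : Int × (List Char × String)}
    (h1 : pvTripLt a b) (h2 : pvTripLt b c) : pvTripLt a c := by
  rcases h1 with h1 | ⟨e1, h1⟩
  · rcases h2 with h2 | ⟨e2, _⟩
    · exact Or.inl (lt_trans h1 h2)
    · exact Or.inl (e2 ▸ h1)
  · rcases h2 with h2 | ⟨e2, h2⟩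
    · exact Or.inl (e1 ▸ h2)
    · refine Or.inr ⟨e1.trans e2, ?_⟩
      rcases h1 with h1 | ⟨f1, h1⟩
      · rcases h2 with h2 | ⟨f2, _⟩
        · exact Or.inl (lt_trans h1 h2)
        · exact Or.inl (f2 ▸ h1)
      · rcases h2 with h2 | ⟨f2, h2⟩
        · exact Or.inl (f1 ▸ h2)
        · exact Or.inr ⟨f1.trans f2, lt_trans h1 h2⟩

def pvBef (a b : Int × (List Char × String)) : Bool := @decide (pvTripLt a b) (pvTripLtDec a b)

lemma pvBef_true_iff (a b : Int × (List Char × String)) : pvBef a b = true ↔ pvTripLt a b := by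
  unfold pvBef; exact @decide_eq_true_iff _ (pvTripLtDec a b)

lemma pvBef_false_iff (a b : Int × (List Char × String)) : pvBef a b = false ↔ ¬ pvTripLt a b := by
  unfold pvBef; exact @decide_eq_false_iff_not _ (pvTripLtDec a b)

lemma pv_getLast?_cons_ne {α : Type} (a : α) (l : List α) (h : l ≠ []) :
    (a :: l).getLast? = l.getLast? := by
  cases l with
  | nil => exact absurd rfl h
  | cons b t => rw [List.getLast?_cons_cons]

lemma pv_insertBy_ne_nil {α : Type} (bef : α → α → Bool) (x : α) (ys : List α) :
    PySem.List.insertBy bef x ys ≠ [] := by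
  cases ys with
  | nil => simp [PySem.List.insertBy]
  | cons y ys =>
    rw [PySem.List.insertBy]
    split <;> simp

lemma pv_getLast?_insertBy {α : Type} (bef : α → α → Bool) (x : α) (acc : List α) :
    (PySem.List.insertBy bef x acc).getLast? =
      if acc.any (fun y => bef x y) then acc.getLast? else some x := by
  induction acc with
  | nil => simp [PySem.List.insertBy]
  | cons y ys ih =>
    rw [PySem.List.insertBy]
    by_cases hb : bef x y
    · rw [if_pos hb]
      simp [hb]
    · rw [if_neg hb]
      have hne := pv_insertBy_ne_nil bef x ys
      rw [pv_getLast?_cons_ne _ _ hne, ih]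
      simp only [List.any_cons, hb, Bool.false_or]
      by_cases hany : ys.any (fun y => bef x y)
      · rw [if_pos hany, if_pos hany]
        have hys : ys ≠ [] := by
          rcases List.any_eq_true.1 hany with ⟨z, hz, _⟩
          exact List.ne_nil_of_mem hz
        rw [pv_getLast?_cons_ne _ _ hys]
      · rw [if_neg hany, if_neg hany]

lemma pv_foldl_ins_last {α : Type} (bef : α → α → Bool)
    (htr : ∀ a b c, bef a b = true → bef b c = true → bef a c = true)
    (hirr : ∀ a, bef a a = false) :
    ∀ (xs acc : List α) (m : α), acc.getLast? = some m → (∀ y ∈ acc, bef m y = false) →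
    ∃ m', (xs.foldl (fun acc x => PySem.List.insertBy bef x acc) acc).getLast? = some m' ∧
      m' ∈ m :: xs ∧ ∀ y ∈ acc ++ xs, bef m' y = false := by
  intro xs
  induction xs with
  | nil =>
    intro acc m hm hmax
    exact ⟨m, hm, by simp, by simpa using hmax⟩
  | cons x xs ih =>
    intro acc m hm hmax
    rw [List.foldl_cons]
    by_cases hany : acc.any (fun y => bef x y)
    · have hlast : (PySem.List.insertBy bef x acc).getLast? = some m := by
        rw [pv_getLast?_insertBy, if_pos hany, hm]
      have hmx : bef m x = false := by
        rcases List.any_eq_true.1 hany with ⟨z, hz, hbz⟩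
        by_contra hmx
        have hmx' : bef m x = true := by simpa using hmx
        have := htr m x z hmx' hbz
        rw [hmax z hz] at this
        exact Bool.false_ne_true this
      have hmax' : ∀ y ∈ PySem.List.insertBy bef x acc, bef m y = false := by
        intro y hy
        rcases (PySem.List.mem_insertBy bef x y acc).1 hy with rfl | hy
        · exact hmx
        · exact hmax y hy
      rcases ih _ m hlast hmax' with ⟨m', h1, h2, h3⟩
      refine ⟨m', h1, ?_, ?_⟩
      · rcases List.mem_cons.1 h2 with rfl | h2
        · exact List.mem_cons_self ..
        · exact List.mem_cons_of_mem _ (List.mem_cons_of_mem _ h2)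
      · intro y hy
        rcases List.mem_append.1 hy with hy | hy
        · exact h3 y (List.mem_append.2 (Or.inl ((PySem.List.mem_insertBy bef x y acc).2 (Or.inr hy))))
        · rcases List.mem_cons.1 hy with rfl | hy
          · exact h3 y (List.mem_append.2 (Or.inl ((PySem.List.mem_insertBy bef y y acc).2 (Or.inl rfl))))
          · exact h3 y (List.mem_append.2 (Or.inr hy))
    · have hlast : (PySem.List.insertBy bef x acc).getLast? = some x := by
        rw [pv_getLast?_insertBy, if_neg hany]
      have hmax' : ∀ y ∈ PySem.List.insertBy bef x acc, bef x y = false := by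
        intro y hy
        rcases (PySem.List.mem_insertBy bef x y acc).1 hy with rfl | hy
        · exact hirr y
        · by_contra hxy
          exact absurd (List.any_eq_true.2 ⟨y, hy, by simpa using hxy⟩) (by simpa using hany)
      rcases ih _ x hlast hmax' with ⟨m', h1, h2, h3⟩
      refine ⟨m', h1, ?_, ?_⟩
      · rcases List.mem_cons.1 h2 with rfl | h2
        · exact List.mem_cons_of_mem _ (List.mem_cons_self ..)
        · exact List.mem_cons_of_mem _ (List.mem_cons_of_mem _ h2)
      · intro y hy
        rcases List.mem_append.1 hy with hy | hy
        · exact h3 y (List.mem_append.2 (Or.inl ((PySem.List.mem_insertBy bef x y acc).2 (Or.inr hy))))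
        · rcases List.mem_cons.1 hy with rfl | hy
          · exact h3 y (List.mem_append.2 (Or.inl ((PySem.List.mem_insertBy bef y y acc).2 (Or.inl rfl))))
          · exact h3 y (List.mem_append.2 (Or.inr hy))

lemma pv_pyGet_neg_one_getLast {α : Type} (xs : List α) (h : xs ≠ []) :
    PySem.List.pyGet? xs (-1) = xs.getLast? := by
  unfold PySem.List.pyGet? PySem.List.pyIdx?
  have hlen : 0 < xs.length := List.length_pos_iff.2 h
  rw [if_neg (by omega), if_pos (by omega)]
  rw [List.getLast?_eq_getElem?]
  simp


-- ---- A side: the possibilities list and its sorted-last maximum ----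

def pvPoss (name : List Char) (terms : List String) : List (List Char × String) :=
  terms.foldl (fun acc term =>
      (pvTermVariants term.toList).foldl (fun acc tv =>
        if PySem.Chars.startswith name (tv ++ [' ']) then acc ++ [(tv, term)] else acc) acc) []

lemma pvPoss_eq_flatMap (name : List Char) (terms : List String) :
    pvPoss name terms = terms.flatMap (fun t =>
      ((pvTermVariants t.toList).filter
          (fun tv => PySem.Chars.startswith name (tv ++ [' ']))).map (fun tv => (tv, t))) := by
  unfold pvPoss
  rw [PySem.List.foldl_congr_mem' (g := fun acc t =>
    acc ++ ((pvTermVariants t.toList).filter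
        (fun tv => PySem.Chars.startswith name (tv ++ [' ']))).map (fun tv => (tv, t)))
    (h := by
      intro t ht acc
      exact PySem.List.foldl_append_if _ _ _ _)]
  rw [PySem.List.foldl_append_eq_flatMap]
  simp

lemma pvPoss_mem (name : List Char) (terms : List String) (x : List Char × String) :
    x ∈ pvPoss name terms ↔
      x.2 ∈ terms ∧ x.1 ∈ pvTermVariants x.2.toList ∧
        PySem.Chars.startswith name (x.1 ++ [' ']) = true := by
  rw [pvPoss_eq_flatMap]
  simp only [List.mem_flatMap, List.mem_map, List.mem_filter]
  constructor
  · rintro ⟨t, ht, tv, ⟨hmem, hsw⟩, rfl⟩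
    exact ⟨ht, hmem, hsw⟩
  · rintro ⟨ht, hmem, hsw⟩
    exact ⟨x.2, ht, x.1, ⟨hmem, hsw⟩, rfl⟩

lemma pvPoss_empty_iff (name : List Char) (terms : List String) :
    pvPoss name terms = [] ↔ ∀ p, ¬ pvCand name terms p := by
  rw [List.eq_nil_iff_forall_not_mem]
  constructor
  · rintro h p ⟨ht, tv, hmem, hsw, hL⟩
    exact h (tv, p.2) ((pvPoss_mem name terms (tv, p.2)).2 ⟨ht, hmem, hsw⟩)
  · intro h x hx
    rcases (pvPoss_mem name terms x).1 hx with ⟨ht, hmem, hsw⟩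
    exact h (x.1.length, x.2) ⟨ht, x.1, hmem, hsw, rfl⟩

lemma pvAbest (name : List Char) (terms : List String) (h : ¬ pvPoss name terms = []) :
    ∃ L t, pvIsBest name terms (L, t) ∧ L ≤ name.length ∧
      ((PySem.List.pyGet?
          (@PySem.List.sorted _ _ ⟨pvTripLt⟩ pvTripLtDec
            ((pvPoss name terms).map (fun x => (PySem.Chars.len x.1, x))) (fun x => x) false)
          (-1)).getD (0, ([], ""))).2 = (name.take L, t) := by
  set keyed := (pvPoss name terms).map (fun x => (PySem.Chars.len x.1, x)) with hk
  have hkne : keyed ≠ [] := by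
    simpa [hk] using h
  obtain ⟨k, rest, hcons⟩ := List.exists_cons_of_ne_nil hkne
  have htr : ∀ a b c, pvBef a b = true → pvBef b c = true → pvBef a c = true := by
    intro a b c h1 h2
    exact (pvBef_true_iff a c).2 (pvTripLt_trans ((pvBef_true_iff a b).1 h1) ((pvBef_true_iff b c).1 h2))
  have hirr : ∀ a, pvBef a a = false := fun a => (pvBef_false_iff a a).2 (pvTripLt_irrefl a)
  have hsort : @PySem.List.sorted _ _ ⟨pvTripLt⟩ pvTripLtDec keyed (fun x => x) false =
      keyed.foldl (fun acc x => PySem.List.insertBy pvBef x acc) [] := by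
    rw [@PySem.List.sorted_eq_foldl_insertBy _ _ ⟨pvTripLt⟩ pvTripLtDec keyed (fun x => x)]
    rfl
  have hins0 : PySem.List.insertBy pvBef k [] = [k] := by simp [PySem.List.insertBy]
  obtain ⟨m', hlast, hmem', hmax'⟩ :=
    pv_foldl_ins_last pvBef htr hirr rest [k] k rfl
      (by intro y hy
          rcases List.mem_singleton.1 hy with rfl
          exact hirr y)
  have hfold : keyed.foldl (fun acc x => PySem.List.insertBy pvBef x acc) [] =
      rest.foldl (fun acc x => PySem.List.insertBy pvBef x acc) [k] := by
    rw [hcons, List.foldl_cons, hins0]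
  have hsne : @PySem.List.sorted _ _ ⟨pvTripLt⟩ pvTripLtDec keyed (fun x => x) false ≠ [] := by
    intro hnil
    rw [@PySem.List.sorted_eq_nil_iff _ _ ⟨pvTripLt⟩ pvTripLtDec keyed (fun x => x) false] at hnil
    exact hkne hnil
  have hget : (PySem.List.pyGet?
      (@PySem.List.sorted _ _ ⟨pvTripLt⟩ pvTripLtDec keyed (fun x => x) false) (-1)) = some m' := by
    rw [pv_pyGet_neg_one_getLast _ hsne, hsort, hfold, hlast]
  -- m' is an element of keyed
  have hm'keyed : m' ∈ keyed := by
    rw [hcons]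
    exact hmem'
  have hmaxall : ∀ y ∈ keyed, pvBef m' y = false := by
    intro y hy
    rw [hcons] at hy
    exact hmax' y (by simpa using hy)
  obtain ⟨x, hxposs, hxeq⟩ := List.mem_map.1 hm'keyed
  rcases (pvPoss_mem name terms x).1 hxposs with ⟨ht, hmem, hsw⟩
  obtain ⟨htake, hchar⟩ := pv_matched_take hsw
  refine ⟨x.1.length, x.2, ⟨⟨ht, x.1, hmem, hsw, rfl⟩, ?_⟩, ?_, ?_⟩
  · -- maximality over all candidates
    rintro ⟨L', t'⟩ ⟨ht', tv', hmem', hsw', hL'⟩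
    have hy : (PySem.Chars.len tv', (tv', t')) ∈ keyed :=
      List.mem_map.2 ⟨(tv', t'), (pvPoss_mem name terms (tv', t')).2 ⟨ht', hmem', hsw'⟩, rfl⟩
    have hnlt : ¬ pvTripLt m' (PySem.Chars.len tv', (tv', t')) :=
      (pvBef_false_iff _ _).1 (hmaxall _ hy)
    obtain ⟨htake', _⟩ := pv_matched_take hsw'
    have hm1 : m'.1 = (x.1.length : Int) := by
      rw [← hxeq]
      simp [PySem.Chars.len_eq]
    have hm2 : m'.2 = x := by rw [← hxeq]
    subst hL'
    rcases Nat.lt_trichotomy tv'.length x.1.length with hlt | heq | hgt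
    · exact Or.inl hlt
    · -- same length: variants equal, compare terms
      have htv : tv' = x.1 := by
        rw [htake', htake, heq]
      refine Or.inr ⟨heq, ?_⟩
      rcases lt_trichotomy t' x.2 with h2 | h2 | h2
      · exact Or.inl h2
      · exact Or.inr h2
      · exfalso
        apply hnlt
        refine Or.inr ⟨?_, Or.inr ⟨?_, ?_⟩⟩
        · rw [hm1, PySem.Chars.len_eq, htv]
        · rw [hm2, htv]
        · rw [hm2]; exact h2
    · exfalso
      apply hnlt
      refine Or.inl ?_
      show m'.1 < PySem.Chars.len tv'
      rw [hm1, PySem.Chars.len_eq]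
      exact_mod_cast hgt
  · -- length bound
    have hpre : x.1 <+: name := List.prefix_iff_eq_take.2 htake
    simpa using hpre.length_le
  · rw [hget]
    simp only [Option.getD_some]
    rw [← hxeq]
    show x = (name.take x.1.length, x.2)
    rw [← htake]

-- ---- glue: the two recursions agree step by step ----

lemma pv_chars_eq : ∀ (fuel : Nat) (name : List Char) (terms : List String),
    cut_from_start_chars fuel name terms = cut_from_start_alt_chars fuel name terms := by
  intro fuel
  induction fuel with
  | zero => intro name terms; rfl
  | succ fuel ih =>
    intro name terms
    have hA : cut_from_start_chars (fuel + 1) name terms =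
        (if (pvPoss name terms).isEmpty then ([], name)
         else
           ((((PySem.List.pyGet?
                (@PySem.List.sorted _ _ ⟨pvTripLt⟩ pvTripLtDec
                  ((pvPoss name terms).map (fun x => (PySem.Chars.len x.1, x))) (fun x => x) false)
                (-1)).getD (0, ([], ""))).2.2 ::
              (cut_from_start_chars fuel
                (PySem.Chars.strip (PySem.List.slice name
                  (some (PySem.Chars.len
                    ((PySem.List.pyGet?
                      (@PySem.List.sorted _ _ ⟨pvTripLt⟩ pvTripLtDec
                        ((pvPoss name terms).map (fun x => (PySem.Chars.len x.1, x))) (fun x => x) false)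
                      (-1)).getD (0, ([], ""))).2.1)) none)) terms).1),
            PySem.Chars.strip (cut_from_start_chars fuel
                (PySem.Chars.strip (PySem.List.slice name
                  (some (PySem.Chars.len
                    ((PySem.List.pyGet?
                      (@PySem.List.sorted _ _ ⟨pvTripLt⟩ pvTripLtDec
                        ((pvPoss name terms).map (fun x => (PySem.Chars.len x.1, x))) (fun x => x) false)
                      (-1)).getD (0, ([], ""))).2.1)) none)) terms).2)) := rfl
    have hB : cut_from_start_alt_chars (fuel + 1) name terms =
        (match pvBFold name terms with
         | none => ([], name)
         | some (L, term) =>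
           ((term :: (cut_from_start_alt_chars fuel (PySem.Chars.strip (name.drop L)) terms).1),
            PySem.Chars.strip (cut_from_start_alt_chars fuel (PySem.Chars.strip (name.drop L)) terms).2)) := rfl
    rw [hA, hB]
    by_cases hempty : pvPoss name terms = []
    · rw [if_pos (by simpa [List.isEmpty_iff] using hempty)]
      have hnone : pvBFold name terms = none :=
        (pvBFold_none_iff _ _).2 ((pvPoss_empty_iff _ _).1 hempty)
      rw [hnone]
    · rw [if_neg (by simpa [List.isEmpty_iff] using hempty)]
      obtain ⟨L, t, hbest, hLle, heq⟩ := pvAbest name terms hempty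
      rcases hBF : pvBFold name terms with _ | p
      · exact absurd hbest.1 ((pvBFold_none_iff _ _).1 hBF (L, t))
      · have hp : p = (L, t) := pvIsBest_unique (pvBFold_some _ _ hBF) hbest
        subst hp
        rw [heq]
        have harg : PySem.List.slice name (some (PySem.Chars.len (name.take L, t).1)) none =
            name.drop L := by
          show PySem.List.slice name (some (PySem.Chars.len (name.take L))) none = name.drop L
          rw [PySem.Chars.len_eq, List.length_take, Nat.min_eq_left hLle]
          exact PySem.List.slice_from_natCast name L
        rw [harg, ih]

-- ===== VERDICT (by name: the statement is the Claim_ definition above) =====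
theorem cut_from_start_spec : Claim_equal_cut_from_start := by
  intro name terms _
  unfold Spec_cut_from_start cut_from_start cut_from_start_alt
  rw [pv_chars_eq]
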